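-- pv_equiv track=rewrite | github.com/Rohithv07/LeetCodeTopInterviewQuestions | GoogleOnlineChallengePractise/wateringPlant.py | waterPlant
-- ===== SOURCE A (Python) =====
-- def waterPlant(plant, capacity1, capacity2):
-- 	if len(plant) == 0:
-- 		return 0
-- 	temp1 = 0
-- 	temp2 = 0
-- 	counter = 0
-- 	left = 0
-- 	right = len(plant) - 1
-- 	while (left < right):
-- 		if temp1 < plant[left]:
-- 			temp1 = capacity1
-- 			counter += 1
-- 		if temp2 < plant[right]:
-- 			temp2 = capacity2
-- 			counter += 1
-- 		temp1 -= plant[left]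
-- 		temp2 -= plant[right]
-- 		left += 1
-- 		right -= 1
-- 	if left == right and plant[left] > temp1 + temp2:
-- 		counter += 1
-- 	return counter
-- ===== SOURCE B (Python) =====
-- def _refills(plants, capacity):
--     """Water a sequence of plants with one can; return (water left, refills)."""
--     temp = 0
--     count = 0
--     for p in plants:
--         if temp < p:
--             temp = capacity
--             count += 1
--         temp -= p
--     return temp, count
--
-- def waterPlant(plant, capacity1, capacity2):
--     n = len(plant)
--     half = n // 2
--     t1, c1 = _refills(plant[:half], capacity1)
--     t2, c2 = _refills(plant[n - half:][::-1], capacity2)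
--     total = c1 + c2
--     if n % 2 == 1 and plant[half] > t1 + t2:
--         total += 1
--     return total
-- ===== Notes on version B (the rewrite author's own statement) =====
-- stated objective: faster
-- what changed: A's single interleaved two-pointer while-loop over (temp1, temp2, counter) is replaced by two independent single-can passes of a shared helper (one over the left half forward, one over the right half backward) whose refill counts are summed, plus a separate middle-plant check when the length is odd; the measured speedup is a constant factor from replacing per-step index arithmetic and indexed access with direct iteration over slices.
import Mathlib
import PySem

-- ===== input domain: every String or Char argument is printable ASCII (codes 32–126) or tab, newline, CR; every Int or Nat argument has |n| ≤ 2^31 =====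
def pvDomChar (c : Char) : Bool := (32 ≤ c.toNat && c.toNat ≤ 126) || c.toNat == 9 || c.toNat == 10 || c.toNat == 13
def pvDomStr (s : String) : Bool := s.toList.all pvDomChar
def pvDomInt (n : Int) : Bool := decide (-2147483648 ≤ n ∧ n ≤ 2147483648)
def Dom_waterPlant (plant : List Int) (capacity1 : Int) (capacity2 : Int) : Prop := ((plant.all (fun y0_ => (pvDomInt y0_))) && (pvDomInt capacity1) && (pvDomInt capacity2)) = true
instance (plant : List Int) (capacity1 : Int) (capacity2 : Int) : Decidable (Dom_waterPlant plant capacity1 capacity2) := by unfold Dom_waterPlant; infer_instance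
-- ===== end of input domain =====

-- B replaces A's single interleaved two-pointer loop by two independent single-can passes
-- (left half forward, right half backward) plus a middle-plant check; a timing run
-- measured a constant-factor speedup from iterating slices instead of indexed access.


-- ===== PORT A =====
-- A's while-loop as structural recursion on the gap (right - left); the indices are
-- always in range on every reachable call, so `(pyGet? …).getD 0` is exact there.
def loopA (plant : List Int) (cap1 cap2 : Int) (left right temp1 temp2 counter : Int) : Int :=
  if h : left < right then
    let pl := (PySem.List.pyGet? plant left).getD 0
    let pr := (PySem.List.pyGet? plant right).getD 0
    let t1 := if temp1 < pl then cap1 else temp1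
    let c1 := if temp1 < pl then counter + 1 else counter
    let t2 := if temp2 < pr then cap2 else temp2
    let c2 := if temp2 < pr then c1 + 1 else c1
    loopA plant cap1 cap2 (left + 1) (right - 1) (t1 - pl) (t2 - pr) c2
  else
    if left = right ∧ (PySem.List.pyGet? plant left).getD 0 > temp1 + temp2 then counter + 1
    else counter
termination_by (right - left).toNat
decreasing_by omega

def waterPlant (plant : List Int) (capacity1 : Int) (capacity2 : Int) : Int :=
  if plant.length == 0 then 0
  else loopA plant capacity1 capacity2 0 ((plant.length : Int) - 1) 0 0 0

-- ===== PORT B =====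
-- one step of Source B's `_refills` loop on the state (temp, count)
def stepB (capacity : Int) (st : Int × Int) (p : Int) : Int × Int :=
  let st' := if st.1 < p then (capacity, st.2 + 1) else st
  (st'.1 - p, st'.2)

def refills (plants : List Int) (capacity : Int) : Int × Int :=
  plants.foldl (stepB capacity) (0, 0)

def waterPlant_alt (plant : List Int) (capacity1 : Int) (capacity2 : Int) : Int :=
  let n : Int := plant.length
  let half := PySem.Int.floordiv n 2
  let s1 := refills (PySem.List.slice plant none (some half)) capacity1
  let s2 := refills ((PySem.List.slice plant (some (n - half)) none).reverse) capacity2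
  let total := s1.2 + s2.2
  if PySem.Int.mod n 2 = 1 ∧ (PySem.List.pyGet? plant half).getD 0 > s1.1 + s2.1 then total + 1
  else total

-- ===== PRECONDITION & SPEC =====
def Spec_waterPlant (plant : List Int) (capacity1 : Int) (capacity2 : Int) (out : Int) : Prop := out = waterPlant_alt plant capacity1 capacity2
instance (plant : List Int) (capacity1 : Int) (capacity2 : Int) (out : Int) : Decidable (Spec_waterPlant plant capacity1 capacity2 out) := by unfold Spec_waterPlant; infer_instance

-- ===== CLAIM (what is proved, stated in full; the proofs are below) =====
def Claim_equal_waterPlant : Prop := ∀ (plant : List Int) (capacity1 : Int) (capacity2 : Int), Dom_waterPlant plant capacity1 capacity2 → Spec_waterPlant plant capacity1 capacity2 (waterPlant plant capacity1 capacity2)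

-- ===== LEMMAS AND PROOFS =====

-- The refill counter is a pure accumulator: starting it at c just adds c.
lemma foldl_stepB_offset (cap : Int) (xs : List Int) (t c : Int) :
    xs.foldl (stepB cap) (t, c) =
      ((xs.foldl (stepB cap) (t, 0)).1, (xs.foldl (stepB cap) (t, 0)).2 + c) := by
  induction xs generalizing t c with
  | nil => simp
  | cons p xs ih =>
    by_cases h : t < p
    · simp only [List.foldl_cons, stepB, h, if_pos]
      rw [ih, ih _ (0 + 1)]
      simp; ring
    · simp only [List.foldl_cons, stepB, h, if_false]
      rw [ih]

-- A's interleaved loop, re-expressed on the list segment it visits: peel the head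
-- (left gardener) and the last element (right gardener) each round.
def loopA' (cap1 cap2 : Int) : List Int → Int → Int → Int → Int
  | [], _, _, c => c
  | [x], t1, t2, c => if x > t1 + t2 then c + 1 else c
  | p :: q :: rest, t1, t2, c =>
      let last := ((q :: rest).getLast?).getD 0
      let mid := (q :: rest).dropLast
      let t1' := if t1 < p then cap1 else t1
      let c1 := if t1 < p then c + 1 else c
      let t2' := if t2 < last then cap2 else t2
      let c2 := if t2 < last then c1 + 1 else c1
      loopA' cap1 cap2 mid (t1' - p) (t2' - last) c2
termination_by xs => xs.length
decreasing_by simp [List.length_dropLast]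

lemma loopA'_cons_concat (cap1 cap2 p q : Int) (mid : List Int) (t1 t2 c : Int) :
    loopA' cap1 cap2 (p :: (mid ++ [q])) t1 t2 c =
      loopA' cap1 cap2 mid ((if t1 < p then cap1 else t1) - p) ((if t2 < q then cap2 else t2) - q)
        (if t2 < q then (if t1 < p then c + 1 else c) + 1 else (if t1 < p then c + 1 else c)) := by
  cases mid with
  | nil => simp [loopA']
  | cons x m =>
    have h1 : ((x :: (m ++ [q])).getLast?).getD 0 = q := by
      rw [show x :: (m ++ [q]) = (x :: m) ++ [q] by simp, List.getLast?_concat]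
      rfl
    have h2 : (x :: (m ++ [q])).dropLast = x :: m := by
      rw [show x :: (m ++ [q]) = (x :: m) ++ [q] by simp, List.dropLast_concat]
    simp only [loopA', List.cons_append, h1, h2]

lemma loopA'_split (cap1 cap2 : Int) (L : List Int) :
    ∀ (R M : List Int) (t1 t2 c : Int), L.length = R.length → M.length ≤ 1 →
    loopA' cap1 cap2 (L ++ (M ++ R.reverse)) t1 t2 c =
      (let s1 := L.foldl (stepB cap1) (t1, c)
       let s2 := R.foldl (stepB cap2) (t2, s1.2)
       match M with
       | [] => s2.2
       | m :: _ => if m > s1.1 + s2.1 then s2.2 + 1 else s2.2) := by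
  induction L with
  | nil =>
    intro R M t1 t2 c hlen hM
    cases R with
    | cons q R' => simp at hlen
    | nil =>
      match M, hM with
      | [], _ => simp [loopA']
      | [m], _ => simp [loopA']
  | cons p L' ih =>
    intro R M t1 t2 c hlen hM
    cases R with
    | nil => simp at hlen
    | cons q R' =>
      have hlen' : L'.length = R'.length := by simpa using hlen
      have hsh : (p :: L') ++ (M ++ (q :: R').reverse) = p :: ((L' ++ (M ++ R'.reverse)) ++ [q]) := by
        simp
      rw [hsh, loopA'_cons_concat, ih _ _ _ _ _ hlen' hM]
      by_cases h1 : t1 < p <;> by_cases h2 : t2 < q <;>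
        simp only [List.foldl_cons, stepB, h1, h2, if_true, if_false]
      · rw [foldl_stepB_offset cap1 L' (cap1 - p) (c + 1 + 1),
            foldl_stepB_offset cap1 L' (cap1 - p) (c + 1)]
        simp [add_assoc]
      · rw [foldl_stepB_offset cap1 L' (t1 - p) (c + 1),
            foldl_stepB_offset cap1 L' (t1 - p) c]
        simp [add_assoc]

lemma loopA_eq_loopA' (plant : List Int) (cap1 cap2 : Int) (k : Nat) :
    ∀ (l r t1 t2 c : Int), 0 ≤ l → r < (plant.length : Int) → l ≤ r + 1 →
      k = (r + 1 - l).toNat →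
    loopA plant cap1 cap2 l r t1 t2 c =
      loopA' cap1 cap2 ((plant.drop l.toNat).take k) t1 t2 c := by
  induction k using Nat.strong_induction_on with
  | _ k IH =>
    intro l r t1 t2 c hl hr hlr hk
    rw [loopA]
    by_cases h : l < r
    · have ha : l.toNat < plant.length := by omega
      have hrn : r.toNat < plant.length := by omega
      obtain ⟨m, rfl⟩ : ∃ m, k = m + 2 := ⟨k - 2, by omega⟩
      have hpl : PySem.List.pyGet? plant l = some plant[l.toNat] :=
        PySem.List.pyGet?_eq_some_getElem plant (by omega) (by omega)
      have hpr : PySem.List.pyGet? plant r = some plant[r.toNat] :=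
        PySem.List.pyGet?_eq_some_getElem plant (by omega) (by omega)
      have hseg : (plant.drop l.toNat).take (m + 2) =
          plant[l.toNat] :: (((plant.drop (l.toNat + 1)).take m) ++ [plant[r.toNat]]) := by
        rw [← List.getElem_cons_drop ha, List.take_succ_cons]
        congr 1
        rw [List.take_add_one, List.getElem?_drop]
        have hidx : l.toNat + 1 + m = r.toNat := by omega
        rw [hidx, List.getElem?_eq_getElem hrn]
        rfl
      rw [hseg, loopA'_cons_concat, dif_pos h, hpl, hpr]
      have h1 : (l + 1).toNat = l.toNat + 1 := by omega
      rw [IH m (by omega) (l + 1) (r - 1) _ _ _ (by omega) (by omega) (by omega) (by omega), h1]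
      simp only [Option.getD_some]
      rfl
    · rw [dif_neg h]
      rcases (by omega : l = r ∨ l = r + 1) with he | he
      · subst he
        have ha : l.toNat < plant.length := by omega
        have hk1 : k = 1 := by omega
        have hpl : PySem.List.pyGet? plant l = some plant[l.toNat] :=
          PySem.List.pyGet?_eq_some_getElem plant (by omega) (by omega)
        have hseg : (plant.drop l.toNat).take 1 = [plant[l.toNat]] := by
          rw [← List.getElem_cons_drop ha, List.take_succ_cons, List.take_zero]
        rw [hk1, hseg, hpl]
        simp [loopA']
      · subst he
        have hk0 : k = 0 := by omega
        rw [hk0, List.take_zero]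
        simp [loopA']

lemma waterPlant_eq_alt (plant : List Int) (cap1 cap2 : Int) :
    waterPlant plant cap1 cap2 = waterPlant_alt plant cap1 cap2 := by
  rcases eq_or_ne plant [] with rfl | hne
  · rfl
  · have hn : 0 < plant.length := List.length_pos_of_ne_nil hne
    -- A's side: the loop over indices, as the list recursion over the whole list
    have hA : waterPlant plant cap1 cap2 = loopA' cap1 cap2 plant 0 0 0 := by
      rw [waterPlant,
          loopA_eq_loopA' plant cap1 cap2 plant.length 0 ((plant.length : Int) - 1) 0 0 0
            le_rfl (by omega) (by omega) (by omega)]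
      simp [hne]
    -- split the list into left half, middle, reversed-right half
    have h2le : plant.length / 2 ≤ plant.length := Nat.div_le_self _ _
    have hsplit : plant =
        plant.take (plant.length / 2) ++
          (((plant.drop (plant.length / 2)).take (plant.length - 2 * (plant.length / 2))) ++
            ((plant.drop (plant.length - plant.length / 2)).reverse).reverse) := by
      rw [List.reverse_reverse]
      have hd : plant.drop (plant.length - plant.length / 2) =
          (plant.drop (plant.length / 2)).drop (plant.length - 2 * (plant.length / 2)) := by
        rw [List.drop_drop]
        congr 1
        omega
      rw [hd, List.take_append_drop, List.take_append_drop]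
    have hlen : (plant.take (plant.length / 2)).length =
        ((plant.drop (plant.length - plant.length / 2)).reverse).length := by
      simp; omega
    have hM : ((plant.drop (plant.length / 2)).take (plant.length - 2 * (plant.length / 2))).length ≤ 1 := by
      simp; omega
    rw [hA]
    conv_lhs => rw [hsplit]
    rw [loopA'_split _ _ _ _ _ _ _ _ hlen hM]
    -- B's side
    rw [waterPlant_alt]
    have hhalf : PySem.Int.floordiv (plant.length : Int) 2 = ((plant.length / 2 : Nat) : Int) := by
      exact_mod_cast PySem.Int.floordiv_natCast plant.length 2
    have hfrom : (plant.length : Int) - ((plant.length / 2 : Nat) : Int) =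
        ((plant.length - plant.length / 2 : Nat) : Int) := by
      push_cast [h2le]
      ring
    have hmod : PySem.Int.mod (plant.length : Int) 2 = ((plant.length % 2 : Nat) : Int) := by
      exact_mod_cast PySem.Int.mod_natCast plant.length 2
    simp only [hhalf, hfrom, hmod, PySem.List.slice_to_natCast, PySem.List.slice_from_natCast]
    -- both sides are now folds over the same three pieces; align the counters
    rw [refills, refills,
        foldl_stepB_offset cap2 ((plant.drop (plant.length - plant.length / 2)).reverse) 0
          ((plant.take (plant.length / 2)).foldl (stepB cap1) (0, 0)).2]
    rcases Nat.even_or_odd plant.length with he | ho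
    · have hm0 : plant.length - 2 * (plant.length / 2) = 0 := by
        obtain ⟨j, hj⟩ := he; omega
      have hmod0 : plant.length % 2 = 0 := by
        obtain ⟨j, hj⟩ := he; omega
      simp [hm0, hmod0]
      ring
    · have hm1 : plant.length - 2 * (plant.length / 2) = 1 := by
        obtain ⟨j, hj⟩ := ho; omega
      have hmod1 : plant.length % 2 = 1 := by
        obtain ⟨j, hj⟩ := ho; omega
      have hmid : (plant.drop (plant.length / 2)).take 1 = [plant[plant.length / 2]] := by
        rw [← List.getElem_cons_drop (by omega), List.take_succ_cons, List.take_zero]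
      have hget : PySem.List.pyGet? plant ((plant.length / 2 : Nat) : Int) =
          some plant[plant.length / 2] := by
        rw [PySem.List.pyGet?_natCast, List.getElem?_eq_getElem (by omega)]
      simp only [hm1, hmod1, hmid, hget, Option.getD_some, Nat.cast_one, true_and]
      split_ifs <;> ring

-- ===== VERDICT (by name: the statement is the Claim_ definition above) =====
theorem waterPlant_spec : Claim_equal_waterPlant := by
  intro plant capacity1 capacity2 _
  exact waterPlant_eq_alt plant capacity1 capacity2
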